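-- pv_equiv track=rewrite | github.com/mkbabb/words | src/floridify/cli/utils/fuzzy.py | _is_abbreviation_match
-- ===== SOURCE A (Python) =====
-- def _is_abbreviation_match(pattern: str, candidate: str) -> bool:
--     """Check if pattern could be an abbreviation of candidate."""
--     pattern_idx = 0
--
--     # Must start with first character
--     if not candidate.startswith(pattern[0]):
--         return False
--
--     pattern_idx = 1
--
--     for i in range(1, len(candidate)):
--         if pattern_idx < len(pattern):
--             # Check for next pattern character at word boundaries or after vowels
--             if candidate[i] == pattern[pattern_idx]:
--                 # Good if it's after a vowel or at a word boundary
--                 if i == 0 or candidate[i-1] in 'aeiou' or not candidate[i-1].isalpha():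
--                     pattern_idx += 1
--
--     return pattern_idx == len(pattern)
-- ===== SOURCE B (Python) =====
-- def _is_abbreviation_match(pattern: str, candidate: str) -> bool:
--     """Check if pattern could be an abbreviation of candidate."""
--     if not candidate.startswith(pattern[0]):
--         return False
--     eligible = [candidate[i] for i in range(1, len(candidate))
--                 if candidate[i - 1] in 'aeiou' or not candidate[i - 1].isalpha()]
--     it = iter(eligible)
--     return all(pc in it for pc in pattern[1:])
-- ===== Notes on version B (the rewrite author's own statement) =====
-- stated objective: simpler
-- what changed: Replaced the fused index-counter loop (pattern_idx threaded through every candidate position with nested boundary tests) by a two-phase decomposition: first build the list of boundary-eligible characters with a comprehension, then check that pattern[1:] is a subsequence of it via an iterator scan.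
import Mathlib
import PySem

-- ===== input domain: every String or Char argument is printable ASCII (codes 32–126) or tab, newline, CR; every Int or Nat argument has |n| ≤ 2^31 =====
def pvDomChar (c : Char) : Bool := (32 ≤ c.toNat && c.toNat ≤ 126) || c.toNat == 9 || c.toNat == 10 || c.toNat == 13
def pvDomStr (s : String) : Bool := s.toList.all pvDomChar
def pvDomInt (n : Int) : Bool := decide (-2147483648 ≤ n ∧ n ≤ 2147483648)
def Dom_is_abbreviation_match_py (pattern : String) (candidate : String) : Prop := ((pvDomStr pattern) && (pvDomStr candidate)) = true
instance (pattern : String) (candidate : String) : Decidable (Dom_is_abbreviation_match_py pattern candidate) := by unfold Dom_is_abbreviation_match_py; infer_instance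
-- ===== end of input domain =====

-- B replaces A's fused index-counter loop by a simpler filter-then-subsequence-scan decomposition (return value only; neither mutates).


-- ===== PORT A =====
-- Literal port of A: guard candidate.startswith(pattern[0]); then one loop over
-- i in range(1, len(candidate)) threading pattern_idx (a Nat: it starts at 1 and is only incremented);
-- pattern[pattern_idx] is read only under the guard pattern_idx < len(pattern), so List.getD is exact there.
def is_abbreviation_match_py (pattern : String) (candidate : String) : Bool :=
  match pattern.toList with
  | [] => false  -- Python raises IndexError on pattern[0]; excluded by Pre_
  | p0 :: _ =>
    if !PySem.Chars.startswith candidate.toList [p0] then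
      false
    else
      ((PySem.List.pyRange 1 (candidate.toList.length : Int) 1).foldl (fun pidx i =>
        if pidx < pattern.toList.length then
          if PySem.List.pyGetD candidate.toList i ' ' = pattern.toList.getD pidx ' ' then
            if i == 0 || PySem.Chars.isIn [PySem.List.pyGetD candidate.toList (i - 1) ' '] ['a','e','i','o','u']
                || !PySem.Chars.strIsalpha [PySem.List.pyGetD candidate.toList (i - 1) ' '] then
              pidx + 1
            else pidx
          else pidx
        else pidx) 1) == pattern.toList.length

-- ===== PORT B =====
-- `all(pc in it for pc in pattern[1:])` over the iterator of `eligible`: each pc consumes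
-- the iterator up to its first match; ported as the greedy subsequence recursion it performs.
def pvAllIn : List Char → List Char → Bool
  | [], _ => true
  | _ :: _, [] => false
  | pc :: ps, e :: es => if e = pc then pvAllIn ps es else pvAllIn (pc :: ps) es

def is_abbreviation_match_py_alt (pattern : String) (candidate : String) : Bool :=
  match pattern.toList with
  | [] => false  -- Python raises IndexError on pattern[0]; excluded by Pre_
  | p0 :: prest =>  -- prest = pattern[1:]
    if !PySem.Chars.startswith candidate.toList [p0] then
      false
    else
      pvAllIn prest
        ((PySem.List.pyRange 1 (candidate.toList.length : Int) 1).foldl (fun acc i =>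
          if PySem.Chars.isIn [PySem.List.pyGetD candidate.toList (i - 1) ' '] ['a','e','i','o','u']
              || !PySem.Chars.strIsalpha [PySem.List.pyGetD candidate.toList (i - 1) ' '] then
            acc ++ [PySem.List.pyGetD candidate.toList i ' ']
          else acc) [])

-- ===== PRECONDITION & SPEC =====
-- Pre_ excludes only the empty pattern, on which A (and B alike) raise IndexError at pattern[0].
def Pre_is_abbreviation_match_py (pattern : String) (candidate : String) : Prop :=
  pattern.toList ≠ []
instance (pattern : String) (candidate : String) : Decidable (Pre_is_abbreviation_match_py pattern candidate) := by unfold Pre_is_abbreviation_match_py; infer_instance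
def pvWitness_is_abbreviation_match_py : String × String := ("ab", "ab")

def Spec_is_abbreviation_match_py (pattern : String) (candidate : String) (out : Bool) : Prop := out = is_abbreviation_match_py_alt pattern candidate
instance (pattern : String) (candidate : String) (out : Bool) : Decidable (Spec_is_abbreviation_match_py pattern candidate out) := by unfold Spec_is_abbreviation_match_py; infer_instance

-- ===== CLAIM (what is proved, stated in full; the proofs are below) =====
def Claim_equal_is_abbreviation_match_py : Prop := ∀ (pattern : String) (candidate : String), Dom_is_abbreviation_match_py pattern candidate → Pre_is_abbreviation_match_py pattern candidate → Spec_is_abbreviation_match_py pattern candidate (is_abbreviation_match_py pattern candidate)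

-- ===== LEMMAS AND PROOFS =====

-- the boundary test on the previous character, the shared shape of both loop bodies
def pvB (prev : Char) : Bool :=
  PySem.Chars.isIn [prev] ['a','e','i','o','u'] || !PySem.Chars.strIsalpha [prev]

-- the pattern-advance step once the boundary test has been factored out
def pvStep (p : List Char) (pidx : Nat) (cu : Char) : Nat :=
  if pidx < p.length then if cu = p.getD pidx ' ' then pidx + 1 else pidx else pidx

-- the pairs (c[i-1], c[i]) for i in range(1, len(c)) are the consecutive pairs of c
lemma pvPairs (c : List Char) :
    (PySem.List.pyRange 1 (c.length : Int) 1).map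
      (fun i => (PySem.List.pyGetD c (i - 1) ' ', PySem.List.pyGetD c i ' ')) = c.zip c.tail := by
  apply List.ext_getElem
  · simp [PySem.List.length_pyRange_one, List.length_zip]
  · intro k h1 h2
    simp only [List.getElem_map, PySem.List.getElem_pyRange_one]
    have hk : k + 1 < c.length := by
      have := h1; simp [PySem.List.length_pyRange_one] at this; omega
    rw [List.getElem_zip]
    have e1 : (1 : Int) + k - 1 = (k : Int) := by omega
    have e2 : (1 : Int) + k = ((k + 1 : Nat) : Int) := by push_cast; omega
    rw [e1, e2, PySem.List.pyGetD_natCast, PySem.List.pyGetD_natCast]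
    have hk2 : k < c.length := by omega
    simp [hk, hk2, List.getElem_tail]

-- A's fold over the pairs = fold of pvStep over the boundary-filtered second components
lemma pvFilt (p : List Char) (zs : List (Char × Char)) (k : Nat) :
    zs.foldl (fun pidx pr =>
      if pidx < p.length then
        if pr.2 = p.getD pidx ' ' then
          if pvB pr.1 then pidx + 1 else pidx
        else pidx
      else pidx) k
    = ((zs.filter (fun pr => pvB pr.1)).map (·.2)).foldl (pvStep p) k := by
  induction zs generalizing k with
  | nil => rfl
  | cons z zs ih =>
    by_cases hb : pvB z.1
    · simp only [List.foldl_cons, List.filter_cons, hb, if_pos, List.map_cons, pvStep]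
      rw [ih]
    · simp only [List.foldl_cons, List.filter_cons, hb, Bool.false_eq_true, if_false]
      rw [← ih]
      congr 1
      split_ifs <;> rfl

-- once pattern_idx has reached len(pattern) it never moves again
lemma pvStay (p : List Char) (es : List Char) (k : Nat) (h : ¬ k < p.length) :
    es.foldl (pvStep p) k = k := by
  induction es with
  | nil => rfl
  | cons e es ih =>
    rw [List.foldl_cons]
    have : pvStep p k e = k := by unfold pvStep; rw [if_neg h]
    rw [this]; exact ih

-- the counter fold reaches len(pattern) iff p.drop k is a greedy subsequence of es
lemma pvMain (p : List Char) (es : List Char) : ∀ (k : Nat), k ≤ p.length →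
    (es.foldl (pvStep p) k == p.length) = pvAllIn (p.drop k) es := by
  induction es with
  | nil =>
    intro k hk
    rcases Nat.lt_or_ge k p.length with h | h
    · have hdrop : p.drop k = p[k] :: p.drop (k + 1) := List.drop_eq_getElem_cons h
      rw [List.foldl_nil, hdrop]
      show (k == p.length) = false
      simp; omega
    · have hkl : k = p.length := by omega
      rw [List.foldl_nil, hkl, List.drop_length]
      simp [pvAllIn]
  | cons e es ih =>
    intro k hk
    rcases Nat.lt_or_ge k p.length with h | h
    · have hdrop : p.drop k = p[k] :: p.drop (k + 1) := List.drop_eq_getElem_cons h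
      have hget : p.getD k ' ' = p[k] := List.getD_eq_getElem p ' ' h
      rw [List.foldl_cons, hdrop]
      show (List.foldl (pvStep p) (pvStep p k e) es == p.length)
          = pvAllIn (p[k] :: p.drop (k + 1)) (e :: es)
      by_cases he : e = p[k]
      · have hstep : pvStep p k e = k + 1 := by
          unfold pvStep; rw [if_pos h, if_pos (by rw [hget]; exact he)]
        have hall : pvAllIn (p[k] :: p.drop (k + 1)) (e :: es) = pvAllIn (p.drop (k + 1)) es := by
          unfold pvAllIn; rw [if_pos he, ← pvAllIn.eq_def]
        rw [hstep, hall, ih (k + 1) (by omega)]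
      · have hstep : pvStep p k e = k := by
          unfold pvStep; rw [if_pos h, if_neg (by rw [hget]; exact he)]
        have hall : pvAllIn (p[k] :: p.drop (k + 1)) (e :: es) = pvAllIn (p[k] :: p.drop (k + 1)) es := by
          unfold pvAllIn; rw [if_neg he, ← pvAllIn.eq_def]
        rw [hstep, hall, ← hdrop, ih k hk]
    · have hkl : k = p.length := by omega
      rw [pvStay p _ _ (by omega), hkl, List.drop_length]
      simp [pvAllIn]

-- ===== VERDICT (by name: the statement is the Claim_ definition above) =====
theorem is_abbreviation_match_py_spec : Claim_equal_is_abbreviation_match_py := by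
  intro pattern candidate _ hpre
  show is_abbreviation_match_py pattern candidate = is_abbreviation_match_py_alt pattern candidate
  unfold is_abbreviation_match_py is_abbreviation_match_py_alt
  rcases hp : pattern.toList with _ | ⟨p0, prest⟩
  · exact absurd hp hpre
  · simp only [hp]
    set p : List Char := p0 :: prest with hpdef
    set c : List Char := candidate.toList with hcdef
    by_cases hs : PySem.Chars.startswith c [p0]
    · rw [if_neg (by simp [hs]), if_neg (by simp [hs])]
      have hA : (PySem.List.pyRange 1 (c.length : Int) 1).foldl (fun pidx i =>
          if pidx < p.length then
            if PySem.List.pyGetD c i ' ' = p.getD pidx ' ' then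
              if i == 0 || PySem.Chars.isIn [PySem.List.pyGetD c (i - 1) ' '] ['a','e','i','o','u']
                  || !PySem.Chars.strIsalpha [PySem.List.pyGetD c (i - 1) ' '] then
                pidx + 1
              else pidx
            else pidx
          else pidx) 1
          = (c.zip c.tail).foldl (fun pidx pr =>
              if pidx < p.length then
                if pr.2 = p.getD pidx ' ' then
                  if pvB pr.1 then pidx + 1 else pidx
                else pidx
              else pidx) 1 := by
        rw [← pvPairs c, List.foldl_map]
        apply PySem.List.foldl_congr_mem
        intro acc x hx
        have hx1 : (1 : Int) ≤ x := (PySem.List.mem_pyRange_one.mp hx).1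
        have hx0 : (x == 0) = false := by simp; omega
        simp only [hx0, Bool.false_or, pvB]
        rfl
      have hB : (PySem.List.pyRange 1 (c.length : Int) 1).foldl (fun acc i =>
          if PySem.Chars.isIn [PySem.List.pyGetD c (i - 1) ' '] ['a','e','i','o','u']
              || !PySem.Chars.strIsalpha [PySem.List.pyGetD c (i - 1) ' '] then
            acc ++ [PySem.List.pyGetD c i ' ']
          else acc) []
          = ((c.zip c.tail).filter (fun pr => pvB pr.1)).map (·.2) := by
        rw [← pvPairs c, List.filter_map, List.map_map]
        have := PySem.List.foldl_append_if
          (l := PySem.List.pyRange 1 (c.length : Int) 1)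
          (p := fun i : Int => pvB (PySem.List.pyGetD c (i - 1) ' '))
          (f := fun i : Int => PySem.List.pyGetD c i ' ')
          (acc := ([] : List Char))
        simpa [pvB, Function.comp] using this
      rw [hA, hB, pvFilt, pvMain p _ 1 (by simp [hpdef])]
      rw [hpdef, List.drop_one, List.tail_cons]
    · rw [if_pos (by simp [hs]), if_pos (by simp [hs])]
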